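-- pv_equiv track=rewrite | github.com/pypi-data/pypi-mirror-85 | packages/fastutils/fastutils-0.35.0.tar.gz/fastutils-0.35.0/fastutils/numericutils.py | binary_decompose
-- ===== SOURCE A (Python) =====
-- def binary_decompose(value):
--     values = set()
--     binary_string = bin(value)[2:]
--     length = len(binary_string) - 1
--     for c in binary_string:
--         if c == "1":
--             values.add(2**length)
--         length -= 1
--     return values
-- ===== SOURCE B (Python) =====
-- def binary_decompose(value):
--     n = abs(value)
--     values = set()
--     while n:
--         high = 1 << (n.bit_length() - 1)
--         values.add(high)
--         n -= high
--     return values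
-- ===== Notes on version B (the rewrite author's own statement) =====
-- stated objective: alternative
-- what changed: B extracts set bits arithmetically (repeatedly peeling the highest set bit of abs(value) via bit_length and subtraction) instead of formatting the number as a binary string and scanning its characters with a position counter.
import Mathlib
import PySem

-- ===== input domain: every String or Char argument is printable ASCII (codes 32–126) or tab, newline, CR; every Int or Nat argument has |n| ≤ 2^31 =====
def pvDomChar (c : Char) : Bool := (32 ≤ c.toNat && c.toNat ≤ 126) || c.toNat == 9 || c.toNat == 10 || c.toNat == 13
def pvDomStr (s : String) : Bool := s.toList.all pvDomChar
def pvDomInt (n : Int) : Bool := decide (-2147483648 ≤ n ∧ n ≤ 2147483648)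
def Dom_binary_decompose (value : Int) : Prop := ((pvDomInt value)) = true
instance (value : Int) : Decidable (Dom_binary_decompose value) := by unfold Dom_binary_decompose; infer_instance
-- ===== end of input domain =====

-- B replaces A's binary-string scan by arithmetic extraction of the set bits of abs(value)
-- (alternative algorithm of similar cost); return values are Python sets, compared as finite sets.

-- ===== PORT A =====
-- binary digits of n, most significant first, [] for n = 0 (the digit part of Python's bin)
def pvBinAux (n : Nat) : List Char :=
  if h : n = 0 then []
  else pvBinAux (n / 2) ++ [if n % 2 = 1 then '1' else '0']
decreasing_by exact Nat.div_lt_self (Nat.pos_of_ne_zero h) (by omega)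

-- one step of A's for-loop; the state is (values, length).  Python computes 2**length; whenever
-- the scanned character is '1' the counter is ≥ 0, so `.toNat` is exact there.
def pvStepA (st : PySem.Set Int × Int) (c : Char) : PySem.Set Int × Int :=
  if c = '1' then (PySem.Set.add st.1 ((2 : Int) ^ st.2.toNat), st.2 - 1) else (st.1, st.2 - 1)

def binary_decompose (value : Int) : List Int :=
  let binString : List Char :=
    (if value < 0 then ['-', '0', 'b'] else ['0', 'b']) ++
      (if value.natAbs = 0 then ['0'] else pvBinAux value.natAbs)
  let binary_string := PySem.List.slice binString (some 2) none
  let length : Int := (binary_string.length : Int) - 1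
  (binary_string.foldl pvStepA (PySem.Set.empty, length)).1

-- ===== PORT B =====
-- the while-loop of B: peel off the highest set bit of n until n = 0
def pvAltGo (n : Nat) (values : PySem.Set Int) : PySem.Set Int :=
  if h : n = 0 then values
  else
    let high := 2 ^ (PySem.Int.bitLength (n : Int) - 1)
    pvAltGo (n - high) (PySem.Set.add values (high : Int))
termination_by n
decreasing_by
  have h1 : 2 ^ (PySem.Int.bitLength (n : Int) - 1) ≤ n := by
    simpa using PySem.Int.two_pow_bitLength_le (n : Int) (by exact_mod_cast h)
  have h2 : 0 < 2 ^ (PySem.Int.bitLength (n : Int) - 1) := Nat.two_pow_pos _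
  omega

def binary_decompose_alt (value : Int) : List Int :=
  pvAltGo value.natAbs PySem.Set.empty

-- ===== PRECONDITION & SPEC =====
def Spec_binary_decompose (value : Int) (out : List Int) : Prop := out = binary_decompose_alt value
instance (value : Int) (out : List Int) : Decidable (Spec_binary_decompose value out) := by unfold Spec_binary_decompose; infer_instance

-- ===== CLAIM (what is proved, stated in full; the proofs are below) =====
def Claim_equal_binary_decompose : Prop := ∀ (value : Int), Dom_binary_decompose value → Spec_binary_decompose value (binary_decompose value)

-- ===== LEMMAS AND PROOFS =====
-- reference list: the powers of two in n's binary form, highest first, exponents shifted by k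
def pvRef (n k : Nat) : List Int :=
  if h : n = 0 then []
  else pvRef (n / 2) (k + 1) ++ (if n % 2 = 1 then [(2 : Int) ^ k] else [])
decreasing_by exact Nat.div_lt_self (Nat.pos_of_ne_zero h) (by omega)

lemma pvRef_zero (k : Nat) : pvRef 0 k = [] := by rw [pvRef]; rfl

lemma pvRef_mem (n k : Nat) : ∀ x ∈ pvRef n k, ∃ j, k ≤ j ∧ x = (2 : Int) ^ j := by
  induction n using Nat.strong_induction_on generalizing k with
  | _ n ih =>
    intro x hx
    rw [pvRef] at hx
    by_cases h : n = 0
    · simp [h] at hx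
    · simp only [h, dif_neg, not_false_iff, List.mem_append] at hx
      rcases hx with hx | hx
      · obtain ⟨j, hj, rfl⟩ := ih (n / 2) (Nat.div_lt_self (Nat.pos_of_ne_zero h) (by omega)) (k + 1) x hx
        exact ⟨j, by omega, rfl⟩
      · rcases (by split_ifs at hx <;> simp_all : x = (2 : Int) ^ k) with rfl
        exact ⟨k, le_refl _, rfl⟩

lemma pvPow_ne (k j : Nat) (h : k < j) : (2 : Int) ^ k ≠ (2 : Int) ^ j := by
  intro he
  have := pow_lt_pow_right₀ (a := (2 : Int)) (by norm_num) h
  omega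

lemma pvT_le (n : Nat) (h : n ≠ 0) : 2 ^ (PySem.Int.bitLength (n : Int) - 1) ≤ n := by
  simpa using PySem.Int.two_pow_bitLength_le (n : Int) (by exact_mod_cast h)

lemma pvLt_two_T (n : Nat) (h : n ≠ 0) : n < 2 * 2 ^ (PySem.Int.bitLength (n : Int) - 1) := by
  have h1 : n < 2 ^ PySem.Int.bitLength (n : Int) := by
    simpa using PySem.Int.lt_two_pow_bitLength (n : Int)
  have h2 : PySem.Int.bitLength (n : Int) = PySem.Int.bitLength ((n / 2 : Nat) : Int) + 1 :=
    PySem.Int.bitLength_natCast (Nat.pos_of_ne_zero h)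
  calc n < 2 ^ PySem.Int.bitLength (n : Int) := h1
    _ = 2 * 2 ^ (PySem.Int.bitLength (n : Int) - 1) := by rw [h2]; rw [show PySem.Int.bitLength ((n / 2 : Nat) : Int) + 1 - 1 = PySem.Int.bitLength ((n / 2 : Nat) : Int) from rfl, pow_succ]; ring

lemma pvRef_top (n : Nat) : ∀ k : Nat, n ≠ 0 →
    pvRef n k = (2 : Int) ^ (PySem.Int.bitLength (n : Int) - 1 + k)
      :: pvRef (n - 2 ^ (PySem.Int.bitLength (n : Int) - 1)) k := by
  induction n using Nat.strong_induction_on with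
  | _ n ih =>
    intro k h
    have hbl : PySem.Int.bitLength (n : Int) = PySem.Int.bitLength ((n / 2 : Nat) : Int) + 1 :=
      PySem.Int.bitLength_natCast (Nat.pos_of_ne_zero h)
    by_cases hm0 : n / 2 = 0
    · -- n = 1
      have hn1 : n = 1 := by omega
      subst hn1
      have hb1 : PySem.Int.bitLength (1 : Int) = 1 := by decide
      rw [pvRef]
      norm_num [hb1, pvRef_zero]
    · have hblm : PySem.Int.bitLength ((n / 2 : Nat) : Int)
          = PySem.Int.bitLength ((n / 2 / 2 : Nat) : Int) + 1 :=
        PySem.Int.bitLength_natCast (Nat.pos_of_ne_zero hm0)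
      have hTm_le : 2 ^ (PySem.Int.bitLength ((n / 2 : Nat) : Int) - 1) ≤ n / 2 := pvT_le _ hm0
      -- abbreviations
      set Bm := PySem.Int.bitLength ((n / 2 : Nat) : Int) with hBm
      have hBm1 : 1 ≤ Bm := by omega
      have hT : 2 ^ (PySem.Int.bitLength (n : Int) - 1) = 2 * 2 ^ (Bm - 1) := by
        rw [hbl]; simp; rw [← pow_succ']; congr 1; omega
      have hsub2 : (n - 2 ^ (PySem.Int.bitLength (n : Int) - 1)) / 2 = n / 2 - 2 ^ (Bm - 1) := by
        rw [hT]; omega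
      have hsubm : (n - 2 ^ (PySem.Int.bitLength (n : Int) - 1)) % 2 = n % 2 := by
        rw [hT]; omega
      rw [pvRef, dif_neg h, ih (n / 2) (Nat.div_lt_self (Nat.pos_of_ne_zero h) (by omega)) (k + 1) hm0]
      rw [show Bm - 1 + (k + 1) = PySem.Int.bitLength (n : Int) - 1 + k by omega]
      by_cases hz : n - 2 ^ (PySem.Int.bitLength (n : Int) - 1) = 0
      · have hmz : n / 2 - 2 ^ (Bm - 1) = 0 := by omega
        have hpar : n % 2 = 0 := by
          have := hT; omega
        rw [hz, hmz, hpar]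
        simp [pvRef_zero]
      · conv_rhs => rw [pvRef, dif_neg hz, hsub2, hsubm]
        norm_cast

-- A's loop over the digit string of n, started with counter (len - 1 + k), appends pvRef n k
lemma pvFoldA_eq (n : Nat) : ∀ (k : Nat) (s : PySem.Set Int),
    (∀ x ∈ s, ∀ j : Nat, k ≤ j → x ≠ (2 : Int) ^ j) →
    (pvBinAux n).foldl pvStepA (s, ((pvBinAux n).length : Int) + (k : Int) - 1)
      = (s ++ pvRef n k, (k : Int) - 1) := by
  induction n using Nat.strong_induction_on with
  | _ n ih =>
    intro k s hs
    by_cases h : n = 0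
    · subst h; simp [pvBinAux, pvRef]
    · rw [pvBinAux, dif_neg h, pvRef, dif_neg h, List.foldl_append]
      have hlen : ((pvBinAux (n / 2) ++ [if n % 2 = 1 then '1' else '0']).length : Int)
          = ((pvBinAux (n / 2)).length : Int) + 1 := by
        simp
      rw [hlen]
      have hc : ((pvBinAux (n / 2)).length : Int) + 1 + (k : Int) - 1
          = ((pvBinAux (n / 2)).length : Int) + ((k + 1 : Nat) : Int) - 1 := by push_cast; ring
      rw [hc, ih (n / 2) (Nat.div_lt_self (Nat.pos_of_ne_zero h) (by omega)) (k + 1) s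
        (fun x hx j hj => hs x hx j (by omega))]
      have hfresh : (2 : Int) ^ k ∉ s ++ pvRef (n / 2) (k + 1) := by
        intro hmem
        rcases List.mem_append.mp hmem with hm | hm
        · exact hs _ hm k (le_refl _) rfl
        · obtain ⟨j, hj, he⟩ := pvRef_mem (n / 2) (k + 1) _ hm
          exact pvPow_ne k j (by omega) he
      simp only [List.foldl_cons, List.foldl_nil, pvStepA]
      have hk1 : ((k + 1 : Nat) : Int) - 1 = (k : Int) := by push_cast; ring
      by_cases hm : n % 2 = 1
      · simp only [hm, if_pos, hk1, Int.toNat_natCast]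
        rw [PySem.Set.add_of_not_mem (by simpa using hfresh)]
        simp [List.append_assoc]
      · simp [hm]

lemma pvAltGo_eq (n : Nat) : ∀ s : PySem.Set Int,
    (∀ x ∈ s, ∀ j : Nat, 2 ^ j ≤ n → x ≠ (2 : Int) ^ j) →
    pvAltGo n s = s ++ pvRef n 0 := by
  induction n using Nat.strong_induction_on with
  | _ n ih =>
    intro s hs
    by_cases h : n = 0
    · subst h; rw [pvAltGo]; simp [pvRef_zero]
    · rw [pvAltGo, dif_neg h]
      show pvAltGo (n - 2 ^ (PySem.Int.bitLength (n : Int) - 1))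
        (PySem.Set.add s ((2 ^ (PySem.Int.bitLength (n : Int) - 1) : Nat) : Int)) = s ++ pvRef n 0
      have hle := pvT_le n h
      have hlt := pvLt_two_T n h
      have hpos : 0 < 2 ^ (PySem.Int.bitLength (n : Int) - 1) := Nat.two_pow_pos _
      have hcast : ((2 ^ (PySem.Int.bitLength (n : Int) - 1) : Nat) : Int)
          = (2 : Int) ^ (PySem.Int.bitLength (n : Int) - 1) := by push_cast; rfl
      have hfresh : ((2 ^ (PySem.Int.bitLength (n : Int) - 1) : Nat) : Int) ∉ s := by
        rw [hcast]; intro hmem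
        exact hs _ hmem (PySem.Int.bitLength (n : Int) - 1) hle rfl
      rw [PySem.Set.add_of_not_mem hfresh]
      rw [ih (n - 2 ^ (PySem.Int.bitLength (n : Int) - 1)) (by omega)
        (s ++ [((2 ^ (PySem.Int.bitLength (n : Int) - 1) : Nat) : Int)])
        (by
          intro x hx j hj
          rcases List.mem_append.mp hx with hm | hm
          · exact hs x hm j (by omega)
          · have hxv : x = ((2 ^ (PySem.Int.bitLength (n : Int) - 1) : Nat) : Int) := by
              simpa using hm
            subst hxv
            rw [hcast]
            have hj' : j < PySem.Int.bitLength (n : Int) - 1 := by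
              have h2j : 2 ^ j < 2 ^ (PySem.Int.bitLength (n : Int) - 1) := by omega
              exact (Nat.pow_lt_pow_iff_right (by omega)).mp h2j
            exact (pvPow_ne j _ hj').symm)]
      rw [pvRef_top n 0 h, hcast]
      simp [List.append_assoc]

lemma pvMain (value : Int) : binary_decompose value = binary_decompose_alt value := by
  have hB : binary_decompose_alt value = pvRef value.natAbs 0 := by
    unfold binary_decompose_alt
    rw [pvAltGo_eq _ PySem.Set.empty (by intro x hx; simp [PySem.Set.empty] at hx)]
    simp [PySem.Set.empty]
  rw [hB]
  rcases lt_trichotomy value 0 with hneg | hzero | hposi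
  · have hnz : value.natAbs ≠ 0 := by omega
    simp only [binary_decompose, if_pos hneg, if_neg hnz]
    have hslice : PySem.List.slice (['-', '0', 'b'] ++ pvBinAux value.natAbs) (some 2) none
        = 'b' :: pvBinAux value.natAbs := by
      rw [PySem.List.slice_from _ (by norm_num)]
      rfl
    rw [hslice]
    rw [List.foldl_cons]
    have hstep : pvStepA (PySem.Set.empty, ((('b' :: pvBinAux value.natAbs).length : Int) - 1)) 'b'
        = (PySem.Set.empty, ((pvBinAux value.natAbs).length : Int) + ((0 : Nat) : Int) - 1) := by
      simp [pvStepA]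
    rw [hstep, pvFoldA_eq value.natAbs 0 PySem.Set.empty (by intro x hx; simp [PySem.Set.empty] at hx)]
    simp [PySem.Set.empty]
  · subst hzero; rw [show Int.natAbs 0 = 0 from rfl, pvRef_zero]; decide
  · have hnz : value.natAbs ≠ 0 := by omega
    simp only [binary_decompose, if_neg (by omega : ¬ value < 0), if_neg hnz]
    have hslice : PySem.List.slice (['0', 'b'] ++ pvBinAux value.natAbs) (some 2) none
        = pvBinAux value.natAbs := by
      rw [PySem.List.slice_from _ (by norm_num)]
      rfl
    rw [hslice]
    rw [show ((pvBinAux value.natAbs).length : Int) - 1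
        = ((pvBinAux value.natAbs).length : Int) + ((0 : Nat) : Int) - 1 by simp]
    rw [pvFoldA_eq value.natAbs 0 PySem.Set.empty (by intro x hx; simp [PySem.Set.empty] at hx)]
    simp [PySem.Set.empty]

-- ===== VERDICT (by name: the statement is the Claim_ definition above) =====
theorem binary_decompose_spec : Claim_equal_binary_decompose := by
  intro value _
  unfold Spec_binary_decompose
  exact pvMain value
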